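-- pv_equiv track=rewrite | github.com/ShashankSubramanian/transformer-perf-estimates | execution_analysis.py | nv_candidates
-- ===== SOURCE A (Python) =====
-- def factors(n):
--     for c in range(1, n+1):
--         if n % c == 0:
--             yield c
--
-- def nv_candidates(tp1, tp2, nvs):
--     # use partial nv domains for tp1 and tp2
--     tp = tp1 * tp2
--     if tp <= nvs:
--         yield (tp1, tp2) # all in nv domain
--     else:
--         for n1 in factors(nvs):
--             n2 = nvs // n1
--             if tp1 % n1 == 0 and tp2 % n2 == 0:
--                 yield (n1, n2)
-- ===== SOURCE B (Python) =====
-- def nv_candidates(tp1, tp2, nvs):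
--     # O(sqrt(nvs)) divisor enumeration: collect small divisors and their
--     # complements, emit in ascending order, filter by the tp1/tp2 conditions.
--     tp = tp1 * tp2
--     if tp <= nvs:
--         yield (tp1, tp2)
--     else:
--         small = []
--         large = []
--         d = 1
--         while d * d <= nvs:
--             if nvs % d == 0:
--                 small.append(d)
--                 q = nvs // d
--                 if q != d:
--                     large.append(q)
--             d += 1
--         for n1 in small + large[::-1]:
--             n2 = nvs // n1
--             if tp1 % n1 == 0 and tp2 % n2 == 0:
--                 yield (n1, n2)
-- ===== Notes on version B (the rewrite author's own statement) =====
-- stated objective: faster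
-- what changed: B enumerates divisors only up to sqrt(nvs), collecting each small divisor and its complement, then walks small ++ reversed(large) (ascending order) instead of A's trial division over every integer 1..nvs.
import Mathlib
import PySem

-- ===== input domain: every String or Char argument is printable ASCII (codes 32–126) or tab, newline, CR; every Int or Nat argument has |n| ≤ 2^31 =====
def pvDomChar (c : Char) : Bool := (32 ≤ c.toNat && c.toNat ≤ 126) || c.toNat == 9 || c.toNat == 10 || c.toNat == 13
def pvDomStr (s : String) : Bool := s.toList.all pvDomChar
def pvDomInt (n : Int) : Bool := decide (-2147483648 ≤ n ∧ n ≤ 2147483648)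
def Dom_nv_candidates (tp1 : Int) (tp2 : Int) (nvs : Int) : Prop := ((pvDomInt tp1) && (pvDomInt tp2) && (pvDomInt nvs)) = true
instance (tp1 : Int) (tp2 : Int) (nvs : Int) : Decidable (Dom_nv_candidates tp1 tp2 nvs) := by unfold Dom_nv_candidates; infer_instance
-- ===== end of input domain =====

-- B replaces A's O(nvs) trial division with an O(√nvs) divisor enumeration
-- (small divisors + reversed complements), same pairs in the same order.

-- ===== PORT A =====
-- A's generator 'factors' (trial division over 1..nvs) is fused into the fold:
-- each loop iteration first tests nvs % c == 0 (the 'factors' yield condition),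
-- then A's own body, exactly as the Python executes.
def nv_candidates (tp1 : Int) (tp2 : Int) (nvs : Int) : List (List Int) :=
  if tp1 * tp2 ≤ nvs then [[tp1, tp2]]
  else
    (PySem.List.pyRange 1 (nvs + 1) 1).foldl (fun acc c =>
      if PySem.Int.mod nvs c = 0 then
        let n2 := PySem.Int.floordiv nvs c
        if PySem.Int.mod tp1 c = 0 ∧ PySem.Int.mod tp2 n2 = 0 then acc ++ [[c, n2]] else acc
      else acc) []

-- ===== PORT B =====
-- the 'while d * d <= nvs' loop of Source B: collects small divisors (ascending)
-- and their complements q = nvs // d (with q != d) in the 'large' list.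
-- fuel = nvs.toNat bounds the iteration count (the loop stops once d > nvs).
def nvAltCollectGo (nvs : Int) : Nat → Int → List Int → List Int → List Int × List Int
  | 0, _, small, large => (small, large)
  | fuel + 1, d, small, large =>
    if d * d ≤ nvs then
      if PySem.Int.mod nvs d = 0 then
        let q := PySem.Int.floordiv nvs d
        nvAltCollectGo nvs fuel (d + 1) (small ++ [d]) (if q ≠ d then large ++ [q] else large)
      else nvAltCollectGo nvs fuel (d + 1) small large
    else (small, large)

def nv_candidates_alt (tp1 : Int) (tp2 : Int) (nvs : Int) : List (List Int) :=
  if tp1 * tp2 ≤ nvs then [[tp1, tp2]]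
  else
    let p := nvAltCollectGo nvs nvs.toNat 1 [] []
    (p.1 ++ p.2.reverse).foldl (fun acc n1 =>
      let n2 := PySem.Int.floordiv nvs n1
      if PySem.Int.mod tp1 n1 = 0 ∧ PySem.Int.mod tp2 n2 = 0 then acc ++ [[n1, n2]] else acc) []

-- ===== PRECONDITION & SPEC =====
def Spec_nv_candidates (tp1 : Int) (tp2 : Int) (nvs : Int) (out : List (List Int)) : Prop := out = nv_candidates_alt tp1 tp2 nvs
instance (tp1 : Int) (tp2 : Int) (nvs : Int) (out : List (List Int)) : Decidable (Spec_nv_candidates tp1 tp2 nvs out) := by unfold Spec_nv_candidates; infer_instance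

-- ===== CLAIM (what is proved, stated in full; the proofs are below) =====
def Claim_equal_nv_candidates : Prop := ∀ (tp1 : Int) (tp2 : Int) (nvs : Int), Dom_nv_candidates tp1 tp2 nvs → Spec_nv_candidates tp1 tp2 nvs (nv_candidates tp1 tp2 nvs)

-- ===== LEMMAS AND PROOFS =====

-- the small-divisor list the loop collects from d upward, as a filter
def smallOf (nvs : Int) (d : Int) : List Int :=
  (PySem.List.pyRange d (nvs + 1) 1).filter (fun c => decide (c * c ≤ nvs ∧ c ∣ nvs))

-- the complement list the loop collects from d upward
def largeOf (nvs : Int) (d : Int) : List Int :=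
  ((PySem.List.pyRange d (nvs + 1) 1).filter
      (fun c => decide (c * c ≤ nvs ∧ c ∣ nvs ∧ nvs / c ≠ c))).map (fun c => nvs / c)

theorem pyRange_one_pairwise (a b : Int) :
    (PySem.List.pyRange a b 1).Pairwise (· < ·) := by
  by_cases hab : a < b
  · rw [PySem.List.pyRange_one_cons hab]
    refine List.Pairwise.cons ?_ (pyRange_one_pairwise (a + 1) b)
    intro x hx
    have := (PySem.List.mem_pyRange_one).mp hx
    omega
  · rw [PySem.List.pyRange_one_eq_nil (by omega)]
    exact List.Pairwise.nil
termination_by (b - a).toNat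
decreasing_by omega

theorem of_nil (nvs d : Int) (hd : 1 ≤ d) (hdd : ¬ d * d ≤ nvs) :
    smallOf nvs d = [] ∧ largeOf nvs d = [] := by
  have hnil : ∀ (p : Int → Bool), (∀ c, d ≤ c → p c = false) →
      (PySem.List.pyRange d (nvs + 1) 1).filter p = [] := by
    intro p hp
    rw [List.filter_eq_nil_iff]
    intro c hc
    have := (PySem.List.mem_pyRange_one).mp hc
    simp [hp c (by omega)]
  constructor
  · apply hnil
    intro c hc
    have : ¬ (c * c ≤ nvs) := by nlinarith
    simp [this]
  · unfold largeOf
    rw [hnil]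
    · rfl
    · intro c hc
      have : ¬ (c * c ≤ nvs) := by nlinarith
      simp [this]

theorem collect_inv (nvs : Int) :
    ∀ (fuel : Nat) (d : Int) (small large : List Int), 1 ≤ d → nvs + 1 - d ≤ fuel →
      nvAltCollectGo nvs fuel d small large = (small ++ smallOf nvs d, large ++ largeOf nvs d) := by
  intro fuel
  induction fuel with
  | zero =>
    intro d small large hd hf
    have hdn : nvs < d := by omega
    have hdd : ¬ d * d ≤ nvs := by nlinarith
    obtain ⟨h1, h2⟩ := of_nil nvs d hd hdd
    simp [nvAltCollectGo, h1, h2]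
  | succ fuel ih =>
    intro d small large hd hf
    rw [nvAltCollectGo]
    by_cases hdd : d * d ≤ nvs
    · have hdle : d ≤ nvs := by nlinarith
      have hcons : PySem.List.pyRange d (nvs + 1) 1 = d :: PySem.List.pyRange (d + 1) (nvs + 1) 1 :=
        PySem.List.pyRange_one_cons (by omega)
      by_cases hdvd : d ∣ nvs
      · have hmod : PySem.Int.mod nvs d = 0 := (PySem.Int.mod_eq_zero_iff_dvd nvs d).mpr hdvd
        have hq : PySem.Int.floordiv nvs d = nvs / d := PySem.Int.floordiv_eq_ediv_of_pos (by omega)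
        have hsm : smallOf nvs d = d :: smallOf nvs (d + 1) := by
          simp only [smallOf, hcons, List.filter_cons]
          simp [hdd, hdvd]
        rw [if_pos hdd, if_pos hmod]
        show nvAltCollectGo nvs fuel (d + 1) (small ++ [d])
            (if PySem.Int.floordiv nvs d ≠ d then large ++ [PySem.Int.floordiv nvs d] else large) = _
        rw [hq]
        by_cases hqd : nvs / d ≠ d
        · have hlg : largeOf nvs d = nvs / d :: largeOf nvs (d + 1) := by
            simp only [largeOf, hcons, List.filter_cons]
            simp [hdd, hdvd, hqd]
          rw [if_pos hqd, ih (d + 1) _ _ (by omega) (by omega), hsm, hlg]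
          simp
        · have hlg : largeOf nvs d = largeOf nvs (d + 1) := by
            simp only [largeOf, hcons, List.filter_cons]
            simp [hqd]
          rw [if_neg hqd, ih (d + 1) _ _ (by omega) (by omega), hsm, hlg]
          simp
      · have hmod : PySem.Int.mod nvs d ≠ 0 := fun h =>
          hdvd ((PySem.Int.mod_eq_zero_iff_dvd nvs d).mp h)
        have hsm : smallOf nvs d = smallOf nvs (d + 1) := by
          simp only [smallOf, hcons, List.filter_cons]
          simp [hdvd]
        have hlg : largeOf nvs d = largeOf nvs (d + 1) := by
          simp only [largeOf, hcons, List.filter_cons]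
          simp [hdvd]
        rw [if_pos hdd, if_neg hmod, ih (d + 1) _ _ (by omega) (by omega), hsm, hlg]
    · rw [if_neg hdd]
      obtain ⟨h1, h2⟩ := of_nil nvs d hd hdd
      simp [h1, h2]

-- a positive divisor's complement is a positive divisor with product nvs
theorem div_facts (nvs c : Int) (hn : 1 ≤ nvs) (hc : 1 ≤ c) (hdvd : c ∣ nvs) :
    c * (nvs / c) = nvs ∧ 1 ≤ nvs / c ∧ nvs / c ≤ nvs ∧ (nvs / c) ∣ nvs := by
  have hmul : c * (nvs / c) = nvs := Int.mul_ediv_cancel' hdvd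
  have hq1 : 1 ≤ nvs / c := by
    by_contra hq
    push_neg at hq
    have : c * (nvs / c) ≤ 0 := mul_nonpos_of_nonneg_of_nonpos (by omega) (by omega)
    omega
  have hqd : (nvs / c) ∣ nvs := ⟨c, by rw [mul_comm]; exact hmul.symm⟩
  exact ⟨hmul, hq1, Int.le_of_dvd (by omega) hqd, hqd⟩

theorem divisors_split (nvs : Int) (h : 1 ≤ nvs) :
    smallOf nvs 1 ++ (largeOf nvs 1).reverse =
      (PySem.List.pyRange 1 (nvs + 1) 1).filter (fun c => decide (c ∣ nvs)) := by
  have memS : ∀ x, x ∈ smallOf nvs 1 ↔ 1 ≤ x ∧ x < nvs + 1 ∧ x * x ≤ nvs ∧ x ∣ nvs := by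
    intro x
    simp [smallOf, List.mem_filter, PySem.List.mem_pyRange_one]
    tauto
  have memL : ∀ x, x ∈ largeOf nvs 1 ↔
      ∃ c, (1 ≤ c ∧ c < nvs + 1 ∧ (c * c ≤ nvs ∧ c ∣ nvs ∧ nvs / c ≠ c)) ∧ nvs / c = x := by
    intro x
    simp [largeOf, List.mem_map, List.mem_filter, PySem.List.mem_pyRange_one]
    constructor
    · rintro ⟨a, ⟨⟨h1, h2⟩, h3, h4, h5⟩, h6⟩
      exact ⟨a, ⟨h1, h2, h3, h4, h5⟩, h6⟩
    · rintro ⟨c, ⟨h1, h2, h3, h4, h5⟩, h6⟩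
      exact ⟨c, ⟨⟨h1, h2⟩, h3, h4, h5⟩, h6⟩
  -- every element of largeOf is a "big" divisor: nvs < q * q
  have bigL : ∀ x, x ∈ largeOf nvs 1 → 1 ≤ x ∧ x ≤ nvs ∧ x ∣ nvs ∧ nvs < x * x := by
    intro x hx
    obtain ⟨c, ⟨hc1, _, hcc, hcd, hne⟩, hcx⟩ := (memL x).mp hx
    obtain ⟨hmul, hq1, hqle, hqd⟩ := div_facts nvs c h hc1 hcd
    rw [hcx] at hmul hq1 hqle hqd hne
    refine ⟨hq1, hqle, hqd, ?_⟩
    have hclex : c ≤ x := by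
      by_contra hcon
      push_neg at hcon
      have := mul_lt_mul_of_pos_left hcon (by omega : (0 : Int) < c)
      linarith
    have hcltx : c < x := lt_of_le_of_ne hclex fun e => hne e.symm
    have := mul_lt_mul_of_pos_right hcltx (by omega : (0 : Int) < x)
    linarith
  have pwS : (smallOf nvs 1).Pairwise (· < ·) :=
    (pyRange_one_pairwise 1 (nvs + 1)).filter _
  have pwL : (largeOf nvs 1).reverse.Pairwise (· < ·) := by
    rw [List.pairwise_reverse]
    unfold largeOf
    rw [List.pairwise_map]
    refine List.Pairwise.imp_of_mem ?_ ((pyRange_one_pairwise 1 (nvs + 1)).filter _)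
    intro a b ha hb hab
    simp only [List.mem_filter, PySem.List.mem_pyRange_one, decide_eq_true_eq] at ha hb
    obtain ⟨⟨ha1, _⟩, _, had, _⟩ := ha
    obtain ⟨⟨hb1, _⟩, _, hbd, _⟩ := hb
    obtain ⟨hma, hqa1, _, _⟩ := div_facts nvs a h ha1 had
    obtain ⟨hmb, hqb1, _, _⟩ := div_facts nvs b h hb1 hbd
    by_contra hcon
    push_neg at hcon
    nlinarith
  have pwB : (smallOf nvs 1 ++ (largeOf nvs 1).reverse).Pairwise (· < ·) := by
    rw [List.pairwise_append]
    refine ⟨pwS, pwL, ?_⟩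
    intro s hs t ht
    rw [List.mem_reverse] at ht
    obtain ⟨hs1, _, hss, _⟩ := (memS s).mp hs
    obtain ⟨ht1, _, _, htt⟩ := bigL t ht
    by_contra hcon
    push_neg at hcon
    nlinarith
  have pwD : ((PySem.List.pyRange 1 (nvs + 1) 1).filter
      (fun c => decide (c ∣ nvs))).Pairwise (· < ·) :=
    (pyRange_one_pairwise 1 (nvs + 1)).filter _
  have hmem : ∀ x, x ∈ smallOf nvs 1 ++ (largeOf nvs 1).reverse ↔
      x ∈ (PySem.List.pyRange 1 (nvs + 1) 1).filter (fun c => decide (c ∣ nvs)) := by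
    intro x
    rw [List.mem_append, List.mem_reverse, List.mem_filter]
    simp only [PySem.List.mem_pyRange_one, decide_eq_true_eq]
    constructor
    · rintro (hx | hx)
      · obtain ⟨h1, h2, _, h4⟩ := (memS x).mp hx
        exact ⟨⟨h1, h2⟩, h4⟩
      · obtain ⟨h1, h2, h3, _⟩ := bigL x hx
        exact ⟨⟨h1, by omega⟩, h3⟩
    · rintro ⟨⟨hx1, hx2⟩, hxd⟩
      by_cases hxx : x * x ≤ nvs
      · exact Or.inl ((memS x).mpr ⟨hx1, hx2, hxx, hxd⟩)
      · push_neg at hxx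
        obtain ⟨hmul, hq1, hqle, hqd⟩ := div_facts nvs x h hx1 hxd
        set c := nvs / x with hc
        refine Or.inr ((memL x).mpr ⟨c, ⟨hq1, by omega, ?_, hqd, ?_⟩, ?_⟩)
        · -- c * c ≤ nvs since c < x
          have hcx : c < x := by nlinarith
          nlinarith
        · -- nvs / c ≠ c
          have hcx : c < x := by nlinarith
          have : nvs / c = x := by
            rw [show nvs = c * x by rw [← hmul]; ring]
            exact Int.mul_ediv_cancel_left x (by omega)
          omega
        · rw [show nvs = c * x by rw [← hmul]; ring]
          exact Int.mul_ediv_cancel_left x (by omega)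
  refine List.Perm.eq_of_pairwise (fun a b _ _ hab hba => absurd hab (lt_asymm hba)) pwB pwD ?_
  exact (List.perm_ext_iff_of_nodup
    (pwB.imp ne_of_lt) (pwD.imp ne_of_lt)).mpr hmem

-- ===== VERDICT (by name: the statement is the Claim_ definition above) =====
theorem nv_candidates_spec : Claim_equal_nv_candidates := by
  intro tp1 tp2 nvs _
  unfold Spec_nv_candidates nv_candidates nv_candidates_alt
  by_cases htp : tp1 * tp2 ≤ nvs
  · rw [if_pos htp, if_pos htp]
  · rw [if_neg htp, if_neg htp]
    by_cases hnv : 1 ≤ nvs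
    · rw [collect_inv nvs nvs.toNat 1 [] [] (by omega) (by omega)]
      simp only [List.nil_append]
      rw [divisors_split nvs hnv, List.foldl_filter]
      refine PySem.List.foldl_congr_mem _ _ _ _ ?_
      intro acc x _
      by_cases hdvd : x ∣ nvs
      · have hmod : PySem.Int.mod nvs x = 0 := (PySem.Int.mod_eq_zero_iff_dvd nvs x).mpr hdvd
        simp [hmod, hdvd]
      · have hmod : PySem.Int.mod nvs x ≠ 0 := fun hc =>
          hdvd ((PySem.Int.mod_eq_zero_iff_dvd nvs x).mp hc)
        simp [hmod, hdvd]
    · have h0 : PySem.List.pyRange 1 (nvs + 1) 1 = [] :=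
        PySem.List.pyRange_one_eq_nil (by omega)
      have hcol : nvAltCollectGo nvs nvs.toNat 1 [] [] = ([], []) := by
        have hz : nvs.toNat = 0 := by omega
        rw [hz]
        rfl
      rw [h0, hcol]
      rfl
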